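-- pv_equiv track=rewrite | github.com/bmendoza8/Advanced-Compilers-F25 | DataflowAnalysesUsingWorklist/df.py | cprop_merge
-- ===== SOURCE A (Python) =====
-- def cprop_merge(vals_list):
--     out_vals = {}
--     for vals in vals_list:
--         for name, val in vals.items():
--             if val == "?":
--                 out_vals[name] = "?"
--             else:
--                 if name in out_vals:
--                     if out_vals[name] != val:
--                         out_vals[name] = "?"
--                 else:
--                     out_vals[name] = val
--     return out_vals
-- ===== SOURCE B (Python) =====
-- def cprop_merge(vals_list):
--     # pass 1: group every value by name, in first-appearance order
--     groups = {}
--     for vals in vals_list: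
--         for name, val in vals.items():
--             groups.setdefault(name, []).append(val)
--     # pass 2: reduce each group to its meet
--     out_vals = {}
--     for name, vs in groups.items():
--         if "?" in vs:
--             out_vals[name] = "?"
--         else:
--             v0 = vs[0]
--             out_vals[name] = v0 if all(v == v0 for v in vs[1:]) else "?"
--     return out_vals
-- ===== Notes on version B (the rewrite author's own statement) =====
-- stated objective: alternative
-- what changed: replaces A's single incremental merge loop by a two-pass gather/reduce: first group all values by name in first-appearance order, then reduce each group to '?' (if it contains '?' or disagrees with its first value) or its common value
import Mathlib
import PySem

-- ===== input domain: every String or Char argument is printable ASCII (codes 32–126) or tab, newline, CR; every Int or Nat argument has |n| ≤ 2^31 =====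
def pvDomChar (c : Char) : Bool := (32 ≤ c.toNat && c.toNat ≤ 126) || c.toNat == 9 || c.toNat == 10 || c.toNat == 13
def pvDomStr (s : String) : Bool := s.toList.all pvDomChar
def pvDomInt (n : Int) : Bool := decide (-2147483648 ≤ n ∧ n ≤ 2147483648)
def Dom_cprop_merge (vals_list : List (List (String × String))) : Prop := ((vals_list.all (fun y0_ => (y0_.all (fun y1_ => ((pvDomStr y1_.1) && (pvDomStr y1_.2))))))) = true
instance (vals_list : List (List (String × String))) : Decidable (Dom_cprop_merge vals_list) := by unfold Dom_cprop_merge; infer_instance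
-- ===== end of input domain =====

-- B replaces A's incremental merge loop by a two-pass gather/reduce decomposition
-- (group all values by name, then reduce each group); objective: alternative, same cost.

-- ===== PORT A =====
-- body of A's inner loop ('if val == "?" … elif name in out_vals …')
def cpStep (out_vals : PySem.Dict String String) (p : String × String) : PySem.Dict String String :=
  if p.2 = "?" then out_vals.insert p.1 "?"
  else if out_vals.contains p.1 then
    (if out_vals.getD p.1 "" ≠ p.2 then out_vals.insert p.1 "?" else out_vals)
  else out_vals.insert p.1 p.2

def cprop_merge (vals_list : List (List (String × String))) : List (String × String) :=
  (vals_list.foldl (fun out_vals vals => vals.foldl cpStep out_vals) PySem.Dict.empty).items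

-- ===== PORT B =====
-- groups.setdefault(name, []).append(val)
def cpGroupStep (groups : PySem.Dict String (List String)) (p : String × String) : PySem.Dict String (List String) :=
  groups.modify p.1 [] (fun l => l ++ [p.2])

-- body of B's second loop; the [] case is unreachable (every built group is nonempty)
def cpReduce (vs : List String) : String :=
  if vs.contains "?" then "?"
  else match vs with
    | [] => "?"
    | v0 :: rest => if rest.all (· == v0) then v0 else "?"

def cprop_merge_alt (vals_list : List (List (String × String))) : List (String × String) :=
  let groups := vals_list.foldl (fun g vals => vals.foldl cpGroupStep g) PySem.Dict.empty
  (groups.items.foldl (fun o p => o.insert p.1 (cpReduce p.2)) PySem.Dict.empty).items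

-- ===== PRECONDITION & SPEC =====
def Spec_cprop_merge (vals_list : List (List (String × String))) (out : List (String × String)) : Prop := out = cprop_merge_alt vals_list
instance (vals_list : List (List (String × String))) (out : List (String × String)) : Decidable (Spec_cprop_merge vals_list out) := by unfold Spec_cprop_merge; infer_instance

-- ===== CLAIM (what is proved, stated in full; the proofs are below) =====
def Claim_equal_cprop_merge : Prop := ∀ (vals_list : List (List (String × String))), Dom_cprop_merge vals_list → Spec_cprop_merge vals_list (cprop_merge vals_list)

-- ===== LEMMAS AND PROOFS =====

-- proof-only helpers: A's per-name meet, as a fold over that name's value stream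
def cpMerge (s v : String) : String := if v = "?" then "?" else if s ≠ v then "?" else s

def cpStepOpt (o : Option String) (v : String) : Option String :=
  if v = "?" then some "?"
  else match o with
    | some w => if w ≠ v then some "?" else some w
    | none => some v

lemma cpStep_keys (d : PySem.Dict String String) (p : String × String) :
    (cpStep d p).keys = PySem.Set.add d.keys p.1 := by
  by_cases hc : d.contains p.1 = true
  · have hm : p.1 ∈ d.keys := (PySem.Dict.contains_iff_mem_keys _ _).mp hc
    simp [cpStep, hc, PySem.Set.add_of_mem hm]
    split_ifs <;> simp [PySem.Dict.keys_insert_of_contains d _ hc]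
  · have hm : p.1 ∉ d.keys := fun h => hc ((PySem.Dict.contains_iff_mem_keys _ _).mpr h)
    simp [cpStep, hc, PySem.Set.add_of_not_mem hm]
    split_ifs <;> simp [PySem.Dict.keys_insert_of_not_contains d _ (by simpa using hc)]

lemma cpA_keys (pairs : List (String × String)) (d : PySem.Dict String String) :
    (pairs.foldl cpStep d).keys = PySem.Set.update d.keys (pairs.map (·.1)) := by
  induction pairs generalizing d with
  | nil => simp [PySem.Set.update_nil]
  | cons p rest ih =>
    simp only [List.foldl_cons, List.map_cons, PySem.Set.update_cons, ih, cpStep_keys]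

lemma cpStep_get?_ne (d : PySem.Dict String String) (p : String × String) (k : String)
    (h : ¬ p.1 = k) : (cpStep d p).get? k = d.get? k := by
  unfold cpStep
  split_ifs <;> simp [PySem.Dict.get?_insert_of_ne d _ (fun hk => h hk.symm)]

lemma cpStep_get?_eq (d : PySem.Dict String String) (p : String × String) (k : String)
    (h : p.1 = k) : (cpStep d p).get? k = cpStepOpt (d.get? k) p.2 := by
  subst h
  unfold cpStep cpStepOpt
  by_cases hq : p.2 = "?"
  · simp [hq, PySem.Dict.get?_insert_self]
  · by_cases hc : d.contains p.1 = true
    · obtain ⟨w, hw⟩ : ∃ w, d.get? p.1 = some w := by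
        have := PySem.Dict.contains_eq_isSome_get? (d := d) (k := p.1)
        rw [hc] at this
        exact Option.isSome_iff_exists.mp this.symm
      have hgd : d.getD p.1 "" = w := PySem.Dict.getD_of_get?_eq_some d _ hw
      simp [hq, hc, hw, hgd]
      split_ifs <;> simp_all [PySem.Dict.get?_insert_self]
    · have hn : d.get? p.1 = none := by
        have := PySem.Dict.contains_eq_isSome_get? (d := d) (k := p.1)
        simp [hc] at this
        exact Option.not_isSome_iff_eq_none.mp (by simp [← this])
      simp [hq, hc, hn, PySem.Dict.get?_insert_self]

lemma cpA_get? (pairs : List (String × String)) (d : PySem.Dict String String) (k : String) :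
    (pairs.foldl cpStep d).get? k =
      ((pairs.filter (fun p => p.1 == k)).map (·.2)).foldl cpStepOpt (d.get? k) := by
  induction pairs generalizing d with
  | nil => simp
  | cons p rest ih =>
    by_cases h : p.1 = k
    · simp [h, ih, cpStep_get?_eq d p k h]
    · simp [h, ih, cpStep_get?_ne d p k h]

lemma cpFold_some (l : List String) (s : String) :
    l.foldl cpStepOpt (some s) = some (l.foldl cpMerge s) := by
  induction l generalizing s with
  | nil => rfl
  | cons v t ih =>
    simp only [List.foldl_cons]
    have : cpStepOpt (some s) v = some (cpMerge s v) := by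
      unfold cpStepOpt cpMerge; split_ifs <;> simp_all
    rw [this, ih]

lemma cpFold_q (t : List String) : t.foldl cpMerge "?" = "?" := by
  induction t with
  | nil => rfl
  | cons v t ih =>
    simp only [List.foldl_cons]
    have : cpMerge "?" v = "?" := by unfold cpMerge; split_ifs <;> simp_all
    rw [this, ih]

lemma cpFold_char (t : List String) (h : String) (hq : h ≠ "?") :
    t.foldl cpMerge h = if "?" ∈ t then "?" else if t.all (· == h) then h else "?" := by
  induction t generalizing h with
  | nil => simp
  | cons v t ih =>
    simp only [List.foldl_cons]
    by_cases hv : v = "?"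
    · subst hv
      have : cpMerge h "?" = "?" := by simp [cpMerge]
      simp [this, cpFold_q]
    · by_cases hvh : h = v
      · subst hvh
        have : cpMerge h h = h := by simp [cpMerge, hq]
        rw [this, ih h hq]
        simp [Ne.symm hv]
      · have : cpMerge h v = "?" := by simp [cpMerge, hv, hvh]
        rw [this, cpFold_q]
        have : ((v :: t).all (· == h)) = false := by simp [Ne.symm hvh]
        simp [this]

lemma cpFold_reduce (t : List String) (h : String) :
    t.foldl cpMerge h = cpReduce (h :: t) := by
  by_cases hq : h = "?"
  · subst hq
    rw [cpFold_q]
    simp [cpReduce]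
  · rw [cpFold_char t h hq]
    unfold cpReduce
    by_cases hm : "?" ∈ t
    · simp [hm]
    · simp [hm, Ne.symm hq]

lemma cpGroup_eq (pairs : List (String × String)) (d : PySem.Dict String (List String)) :
    pairs.foldl cpGroupStep d = pairs.foldl (fun d p => d.modify p.1 [] fun x => x ++ [p.2]) d := rfl

theorem cp_main (vals_list : List (List (String × String))) :
    cprop_merge vals_list = cprop_merge_alt vals_list := by
  unfold cprop_merge cprop_merge_alt
  rw [← List.foldl_flatten, ← List.foldl_flatten]
  set pairs := vals_list.flatten with hpairs
  set A := pairs.foldl cpStep PySem.Dict.empty with hA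
  set G := pairs.foldl cpGroupStep PySem.Dict.empty with hG
  have hAkeys : A.keys = PySem.Set.update [] (pairs.map (·.1)) := by
    rw [hA, cpA_keys]; rfl
  have hGkeys : G.keys = PySem.Set.update [] (pairs.map (·.1)) := by
    rw [hG, cpGroup_eq, PySem.Dict.keys_foldl_modify_key pairs (·.1) [] (fun d p l => l ++ [p.2])]
    rfl
  have hAnodup : A.keys.Nodup := by
    rw [hAkeys]; exact PySem.Set.nodup_update _ _ List.nodup_nil
  have hGnodup : G.keys.Nodup := by
    rw [hGkeys]; exact PySem.Set.nodup_update _ _ List.nodup_nil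
  have hGitemsNodup : (G.items.map (·.1)).Nodup := hGnodup
  have hOut : (G.items.foldl (fun o p => o.insert p.1 (cpReduce p.2)) PySem.Dict.empty).items
      = G.items.map (fun p => (p.1, cpReduce p.2)) := by
    rw [PySem.Dict.items_foldl_insert_fresh G.items (·.1) (fun p => cpReduce p.2) PySem.Dict.empty
      (fun a _ => by simp [PySem.Dict.contains_empty]) hGitemsNodup]
    rfl
  rw [hOut, PySem.Dict.items_eq_map_keys A hAnodup "", PySem.Dict.items_eq_map_keys G hGnodup [],
    List.map_map, hAkeys, hGkeys]
  apply List.map_congr_left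
  intro k hk
  have hkmem : k ∈ pairs.map (·.1) := by
    have := (PySem.Set.mem_update (s := ([] : PySem.Set String)) (xs := pairs.map (·.1)) (y := k)).mp hk
    simpa using this
  obtain ⟨p, hp, hpk⟩ := List.mem_map.mp hkmem
  have hpfil : p ∈ pairs.filter (fun p => p.1 == k) := List.mem_filter.mpr ⟨hp, by simp [hpk]⟩
  have hfval : p.2 ∈ (pairs.filter (fun p => p.1 == k)).map (·.2) := List.mem_map_of_mem hpfil
  obtain ⟨h0, t0, hft⟩ : ∃ h0 t0, (pairs.filter (fun p => p.1 == k)).map (·.2) = h0 :: t0 := by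
    cases hfv : (pairs.filter (fun p => p.1 == k)).map (·.2) with
    | nil => rw [hfv] at hfval; simp at hfval
    | cons a b => exact ⟨a, b, rfl⟩
  have hAget : A.get? k = some (cpReduce (h0 :: t0)) := by
    rw [hA, cpA_get?, PySem.Dict.get?_empty, hft, List.foldl_cons]
    have h1 : cpStepOpt none h0 = some h0 := by
      unfold cpStepOpt; split_ifs with hq <;> simp [hq]
    rw [h1, cpFold_some, cpFold_reduce]
  have hGget : G.getD k [] = h0 :: t0 := by
    rw [hG, cpGroup_eq, PySem.Dict.getD_foldl_modify_append, PySem.Dict.getD_empty, hft]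
    rfl
  simp only [Function.comp]
  rw [PySem.Dict.getD_of_get?_eq_some A "" hAget, hGget]

-- ===== VERDICT (by name: the statement is the Claim_ definition above) =====
theorem cprop_merge_spec : Claim_equal_cprop_merge := by
  intro vals_list _
  exact cp_main vals_list
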